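/- GENERATED by mk_final_copies.py from the proof of the farm's unit `start_decoder.C13b` (farm:start_decoder.C13b.1: Proof.lean) as the
   re-elaboration sweep compiled it — do not edit. -/
/-
  WORKED PROOF of the unit `start_decoder.C13b` (0x114f32 → 0x115057 with `j + 1` ∨ the check call 0x114f78): it uses the cut assertion
  `At13K … loop12` as its ENTRY and BUILDS `At13J` (through `C13.out13`) and `At13K22` (through `C13.carry13`) as exits.
-/
import Asan.CheckWalk
import Vorbis.Spec.StartDecoderATest
import Vorbis.Spec.StartDecoderCarry
import Vorbis.Spec.Units.start_decoder_C13b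

open X86 X86.User Asan Vorbis Vorbis.Spec Vorbis.Spec.StartDecoder

set_option maxRecDepth 100000
set_option maxHeartbeats 4000000

namespace Vorbis.Spec.start_decoder_C13b

/-- **A check site inside the struct `cb(i)`** (`k` bytes at `c + off`, `c = codebooks + 2120·i`): inside the codebooks block
(`CodebooksOK` over the function's block predicate: `SDw.cb0`), which is live (`Env.live`). -/
theorem c13b_site {g : Ghost} {i : Nat} {A2 A3 Ai : Arena} {A : Arena × List Obj} {v : State}
    (hc : Cur g i A2 A3 Ai A v) (off k : Nat) (h1 : 1 ≤ k) (h2 : off + k ≤ 2120) :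
    Site (Live (stackObjs g.frames' ++ A.2)) (g.cb v.mem i + off) k := by
  rcases (hc.sd.cb0 (by omega)).1 with h0 | hok
  · exact absurd h0 (hc.sd.cb0 (by omega)).2
  · exact hok.site_cb_field hc.sd.env.live i hc.lt off k h2 h1 rfl

/-- `mov edx, 0 ; div r/m32` with a positive divisor (0x114f4f `div ebx`, 0x114f63 `div DWORD PTR [r14+1CH]`): no `#DE`, the quotient
and the remainder are those of the natural numbers. -/
theorem c13b_udiv32 (x d : BitVec 32) (hd1 : 1 ≤ d.toNat) :
    Alu.div false (0#32) x d = some (BitVec.ofNat 32 (x.toNat / d.toNat), BitVec.ofNat 32 (x.toNat % d.toNat)) := by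
  have hd0 : (d == 0) = false := by
    rw [beq_eq_false_iff_ne]
    intro h
    rw [h] at hd1
    exact absurd hd1 (by decide)
  have hD : ((0 : BitVec 32) ++ x).toNat = x.toNat := by
    rw [BitVec.toNat_append]
    show 0 <<< 32 ||| x.toNat = x.toNat
    rw [Nat.zero_shiftLeft, Nat.zero_or]
  have hE : (BitVec.zeroExtend (32 + 32) d).toNat = d.toNat := by
    have := d.isLt
    simp only [BitVec.truncate_eq_setWidth, BitVec.toNat_setWidth]
    omega
  have hq : (((0 : BitVec 32) ++ x) / (BitVec.zeroExtend (32 + 32) d)).toNat = x.toNat / d.toNat := by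
    rw [BitVec.toNat_udiv, hD, hE]
  have hr : (((0 : BitVec 32) ++ x) % (BitVec.zeroExtend (32 + 32) d)).toNat = x.toNat % d.toNat := by
    rw [BitVec.toNat_umod, hD, hE]
  have hqlt : x.toNat / d.toNat < 2 ^ 32 := Nat.lt_of_le_of_lt (Nat.div_le_self _ _) x.isLt
  unfold Alu.div
  simp only [hd0, Bool.false_eq_true, if_false]
  generalize ((0 : BitVec 32) ++ x) / (BitVec.zeroExtend (32 + 32) d) = q at hq
  generalize ((0 : BitVec 32) ++ x) % (BitVec.zeroExtend (32 + 32) d) = r at hr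
  have e0 : BitVec.extractLsb' 32 32 q = 0 := by
    apply BitVec.eq_of_toNat_eq
    rw [BitVec.extractLsb'_toNat, hq, Nat.shiftRight_eq_div_pow, Nat.div_eq_of_lt hqlt]
    rfl
  have e1 : BitVec.setWidth 32 q = BitVec.ofNat 32 (x.toNat / d.toNat) := by
    apply BitVec.eq_of_toNat_eq
    rw [BitVec.toNat_setWidth, hq, BitVec.toNat_ofNat]
  have e2 : BitVec.setWidth 32 r = BitVec.ofNat 32 (x.toNat % d.toNat) := by
    apply BitVec.eq_of_toNat_eq
    rw [BitVec.toNat_setWidth, hr, BitVec.toNat_ofNat]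
  rw [e0, e1, e2]
  simp only [bne_self_eq_false, Bool.false_eq_true, if_false]

/-- The address of the second `div` (0x114f63 `div DWORD PTR [r14+1CH]`): the walker does not read a `div`'s memory operand through its
memory fact, so the walk stops here once. -/
abbrev c13b_atDiv : Word := Vorbis.L.start_decoder.ret266 + 7

/-- Segment C13b (the head of the inner loop 3913): the check of `c->dimensions`, the test `k < D`; `D ≤ k`: `r13d = sparse` from its slot,
`++j`, the outer head (`C13.out13`); otherwise `off = (z / div) % LV` by two walks (the second `div` has a memory operand: the walk
stops at it once, `hd` names the operand), `rdi = rbp = &mults[off]` and the invariant at the check call 0x114f78 (`C13.carry13`).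
The only memory change is the pushed return address of a check call (`[R − 8, R)`: a `C13.QuietWin13`). -/
theorem c13b_walk : Vorbis.Spec.start_decoder_C13b.Statement := by
  intro Lay hLay μ hμ u₀ hcode h_load4
  intro g i n d j kk v hat
  obtain ⟨A, mults, A2, A3, Ai, Am, h⟩ := hat
  have hfr := h.frame
  have he := hfr.entry
  v_entry he
  have w_rip := hfr.rip
  have w_eq : Mem.EqOn Vorbis.L.textLo Vorbis.L.textHi u₀.mem v.mem := hfr.code
  have hdf : v.flags .df = false := (show abiInv _ from hfr.inv).1
  have hmx : v.mxcsr &&& 0x1F80 = 0x1F80 := (show abiInv _ from hfr.inv).2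
  have hsse := Vorbis.sseOK_of_abiInv hfr.inv
  have hRA : g.RA = (g.e.reg .rsp).toNat := rfl
  have hpos : Pos g A := Pos.of hfr h.cur
  have hm0 : MInv g i A2 A3 Ai A v.mem := MInv.of hfr h.cur
  have hcw := hm0.c_where
  have p1 := hpos.r_eq
  have p2 := hpos.ra_lo
  have p3 := hpos.ra_hi
  have hsp : (v.reg .rsp).toNat = g.R := by
    rw [hfr.rsp]
    exact toNat_addr _ (by omega)
  have c_r14 := h.cur.r14
  have c_r15 := h.r15
  have c_r12 := h.r12
  obtain ⟨dv, c_rbx, hdv1, hdv2⟩ := h.div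
  have hslotm : v.mem.readLE (v.reg .rsp + 40) 8 = mults := by
    have := h.mults.slot
    rw [hfr.rsp]
    simp only [vfield]
    exact this
  have hslots : v.mem.readLE (v.reg .rsp + 76) 4 = Codebook.sparse v.mem (g.cb v.mem i) := by
    have := h.slot_sp
    rw [hfr.rsp]
    simp only [vfield]
    exact this
  have hsite0 := c13b_site h.cur 0 4 (by decide) (by decide)
  have hsite1 := c13b_site h.cur 28 4 (by decide) (by decide)
  have hwh0 := Vorbis.Spec.site_where hfr.shadow hfr.offText (by omega) hsite0
  have hwh1 := Vorbis.Spec.site_where hfr.shadow hfr.offText (by omega) hsite1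
  have e : L.textHi = 0x119d40 := rfl
  have ecb : (addr (g.cb v.mem i)).toNat = g.cb v.mem i := toNat_addr _ (by omega)
  -- the two fields of the struct the stretch loads: `dimensions` (= d, in [1, 65535]) and `lookup_values`
  have hd1 := h.k.k1.dim_pos
  have hd2 := h.k.k1.dim_le
  have hdq := h.d_eq
  have hDv : v.mem.readLE (addr (g.cb v.mem i)) 4 = d.toNat := by
    have ee : Codebook.dimensions v.mem (g.cb v.mem i) = sint32 (v.mem.readLE (addr (g.cb v.mem i)) 4) := by
      simp only [vacc, voff, Mem.i32, Mem.u32, Nat.add_zero]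
    have hc := sint32_cases (v.mem.readLE (addr (g.cb v.mem i)) 4)
    rw [← hdq, ee]
    rw [ee] at hd1
    rcases hc with ⟨_, h2⟩ | ⟨_, h2⟩
    · rw [h2]
      exact (Int.toNat_natCast _).symm
    · have hlt : v.mem.readLE (addr (g.cb v.mem i)) 4 < 256 ^ 4 := Mem.readLE_lt' v.mem _ 4
      rw [h2] at hd1
      omega
  have hLV : v.mem.readLE (addr (g.cb v.mem i) + 28) 4 = Codebook.lookup_values v.mem (g.cb v.mem i) := by
    simp only [vacc, voff, Mem.u32, addr_add_lit]
  have hpdv : (Word.part Width.w32 (addr dv)).toNat = dv := by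
    unfold addr
    exact cnt32_part_toNat dv hdv2
  have hquiet : ∀ x, x ∈ [(⟨g.R - 8, g.R⟩ : Span)] → C13.QuietWin13 g x := by
    intro x hx
    rw [List.mem_singleton.mp hx]
    unfold C13.QuietWin13
    left
    simp only []
    omega
  u_walk hcode [hμ.vendor] until [Vorbis.L.start_decoder.loop13, c13b_atDiv] span [Vorbis.L.textLo, Vorbis.L.textHi] side (first | v_side | (simp only [addr]; v_side))
  case check_114f35 =>
    have hun : ShadowUntouched v.mem s_114f35.mem := by v_untouched
    exact Vorbis.Spec.check_site hfr.shadow hun hsite0 (by u_omega)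
  case check_114f57 =>
    have hun : ShadowUntouched v.mem s_114f57.mem := by v_untouched
    exact Vorbis.Spec.check_site hfr.shadow hun hsite1 (by u_omega)
  case side_nofault =>
    have hq1 := c13b_udiv32 (BitVec.ofNat 32 (v.mem.readLE (v.reg Reg.rsp + 72) 4)) (Word.part Width.w32 (addr dv))
      (by rw [hpdv]; exact hdv1)
    cases hopt1.symm.trans hq1
  · -- 0x115057: `D ≤ k`, the inner loop is left: `r13d = sparse`, `++j`
    have hun : ShadowUntouched v.mem s_115053.mem := by v_untouched
    have hinv : (conv u₀).inv s_115053 := by v_inv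
    have hs : Mem.SameExcept [⟨g.R - 8, g.R⟩] v.mem s_115053.mem := by
      rw [w_mem]
      apply Mem.SameExcept.writeLE
      · u_omega
      · refine ⟨_, List.mem_cons_self, ?_, ?_⟩
        · simp only []
          u_omega
        · simp only []
          u_omega
    have hsp01 := h.k.k2.sparse_01
    have hjn := h.j_lt
    have hnlt : Codebook.N v.mem (g.cb v.mem i) < 16777216 := by
      have := Codebook.N_le_entries h.k.k2
      have := h.k.k1.ent_lt
      omega
    have e12 : s_115053.reg .r12 = addr (j + 1) := by
      rw [w_r12]
      unfold addr
      exact cnt32_succ j (by omega)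
    have e13 : s_115053.reg .r13 = addr (Codebook.sparse v.mem (g.cb v.mem i)) := by
      rw [w_r13]
      unfold addr
      exact cnt32_ofBV _ (by omega)
    have hout := C13.out13 (j' := j + 1) h hs hun hquiet w_rip w_rsp w_eq hinv
      ((w_kept.get .r14 rfl)) e12 (by omega) e13
    exact ReachVia.done (Or.inl ⟨A, mults, A2, A3, Ai, Am, hout⟩)
  · -- 0x114f63, the second `div`: its memory operand is `lookup_values`
    have hs1 : Mem.SameExcept [⟨g.R - 8, g.R⟩] v.mem s_114f5e.mem := by
      rw [w_mem]
      apply Mem.SameExcept.writeLE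
      · u_omega
      · refine ⟨_, List.mem_cons_self, ?_, ?_⟩
        · simp only []
          u_omega
        · simp only []
          u_omega
    have hun1 : ShadowUntouched v.mem s_114f5e.mem := by v_untouched
    have ea : (addr (g.cb v.mem i) + 28).toNat = g.cb v.mem i + 28 := by u_omega
    have hd : s_114f5e.mem.readLE (addr (g.cb v.mem i) + 28) 4 = Codebook.lookup_values v.mem (g.cb v.mem i) := by
      rw [hs1.readLE _ 4 (by rw [ea]; omega) (by
        intro x hx
        rw [List.mem_singleton.mp hx, ea]
        simp only []
        omega)]
      exact hLV
    have hlv1 := h.mults.lv_pos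
    have hlv2 := h.mults.lv_lt
    have hdn : (BitVec.ofNat 32 (Codebook.lookup_values v.mem (g.cb v.mem i))).toNat =
        Codebook.lookup_values v.mem (g.cb v.mem i) := by
      rw [BitVec.toNat_ofNat]
      omega
    have hq2 := c13b_udiv32 qr_114f4f.fst (BitVec.ofNat 32 (Codebook.lookup_values v.mem (g.cb v.mem i)))
      (by rw [hdn]; exact hlv1)
    rw [hdn] at hq2
    have esp40 : (v.reg .rsp + 40).toNat = g.R + 40 := by u_omega
    have k_slotm : s_114f5e.mem.readLE (s_114f5e.reg .rsp + 40) 8 = mults := by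
      rw [w_rsp, hs1.readLE _ 8 (by rw [esp40]; omega) (by
        intro x hx
        rw [List.mem_singleton.mp hx, esp40]
        simp only []
        omega)]
      exact hslotm
    have k_r14 : s_114f5e.reg .r14 = addr (g.cb v.mem i) := (w_kept.get .r14 rfl).trans c_r14
    have k_r15 : s_114f5e.reg .r15 = addr kk := (w_kept.get .r15 rfl).trans c_r15
    have k_r12 : s_114f5e.reg .r12 = addr j := (w_kept.get .r12 rfl).trans c_r12
    have k_rbx : s_114f5e.reg .rbx = addr dv := (w_kept.get .rbx rfl).trans c_rbx
    have k_rsp := w_rsp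
    have k_rax := w_rax
    have k_rdx := w_rdx
    have k_r13 := w_r13
    have hdf2 : s_114f5e.flags .df = false := by
      rw [w_flags]
      exact w_df_114f57
    have hmx2 : s_114f5e.mxcsr &&& 0x1F80 = 0x1F80 := by
      rw [w_mxcsr]
      exact hmx
    have hsse2 : SseOK s_114f5e := ⟨hmx2⟩
    u_walk hcode [hμ.vendor] until [Vorbis.L.start_decoder.chk122] span [Vorbis.L.textLo, Vorbis.L.textHi] side (first | v_side | (simp only [addr]; v_side))
    case side_nofault =>
      cases hopt1.symm.trans hq2
    -- 0x114f78, the check call of `mults[off]`: `off` = the remainder of the second `div`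
    have eqr := Option.some.inj (hopt_114f63.symm.trans hq2)
    have esnd : qr_114f63.snd =
        BitVec.ofNat 32 (qr_114f4f.fst.toNat % Codebook.lookup_values v.mem (g.cb v.mem i)) := by
      rw [eqr]
    have hoff : qr_114f4f.fst.toNat % Codebook.lookup_values v.mem (g.cb v.mem i) <
        Codebook.lookup_values v.mem (g.cb v.mem i) := Nat.mod_lt _ (by omega)
    generalize qr_114f4f.fst.toNat % Codebook.lookup_values v.mem (g.cb v.mem i) = off at esnd hoff
    have hsx : Word.ofBV (BitVec.signExtend 64 qr_114f63.snd) = UInt64.ofNat off := by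
      rw [esnd]
      exact cnt32_sext_bv off (by omega)
    have erdi : s_114f75.reg .rdi = addr (mults + 2 * off) := by
      rw [w_rdi, hsx]
      unfold addr
      rw [← UInt64.ofNat_add, ← UInt64.ofNat_add]
      congr 1
      omega
    have er13 : s_114f75.reg .r13 = addr d.toNat := by
      rw [w_r13]
      unfold addr
      exact cnt32_ofBV _ (by omega)
    have hkk := h.k_le
    have c1 := cnt32_toInt d.toNat (by omega)
    have c2 : (Word.part Width.w32 (addr kk)).toInt = (kk : Int) := by
      unfold addr
      exact cnt32_part_toInt kk (by omega)
    rw [c1, c2] at hbr_114f40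
    have hklt : (kk : Int) < d := by omega
    have hun : ShadowUntouched v.mem s_114f75.mem := by v_untouched
    have hinv : (conv u₀).inv s_114f75 := by v_inv
    have hs : Mem.SameExcept [⟨g.R - 8, g.R⟩] v.mem s_114f75.mem := by
      rw [w_mem]
      apply Mem.SameExcept.writeLE
      · u_omega
      · refine ⟨_, List.mem_cons_self, ?_, ?_⟩
        · simp only []
          u_omega
        · simp only []
          u_omega
    have hK := C13.carry13 (pc' := Vorbis.L.start_decoder.chk122) h hs hun hquiet w_rip w_rsp w_eq hinv (w_kept.get .r14 rfl)
      ((w_kept.get .r12 rfl).trans c_r12) h.j_lt ((w_kept.get .r15 rfl).trans c_r15) h.k_le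
      ⟨dv, (w_kept.get .rbx rfl).trans c_rbx, hdv1, hdv2⟩
    obtain ⟨_, _, hcb, _, hsf, _⟩ := C13.core13 (pc' := Vorbis.L.start_decoder.chk122) h hs hun hquiet w_rip w_rsp w_eq hinv
      (w_kept.get .r14 rfl)
    refine ReachVia.done (Or.inr ⟨A, mults, A2, A3, Ai, Am, hK, hklt, er13, off, ?_, erdi, ?_⟩)
    · rw [hcb, hsf.lookup_values]
      exact hoff
    · rw [w_rbp, w_rdi]

end Vorbis.Spec.start_decoder_C13b

theorem Vorbis.Spec.Worked.start_decoder_C13b_ok : Vorbis.Spec.start_decoder_C13b.Statement := Vorbis.Spec.start_decoder_C13b.c13b_walk
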